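-- pv_equiv track=rewrite | github.com/DalgoT4D/DDP_backend | ddpui/core/dashboard_chat/sessions/cache.py | serialize_distinct_cache
-- ===== SOURCE A (Python) =====
-- from typing import Any
--
-- def serialize_distinct_cache(
--     distinct_cache: set[tuple[str, str, str]],
-- ) -> dict[str, Any]:
--     """Convert validated distinct values to a cache-safe nested payload."""
--     serialized: dict[str, dict[str, list[str]]] = {}
--     for table_name, column_name, value in distinct_cache:
--         serialized.setdefault(table_name, {}).setdefault(column_name, []).append(value)
--
--     return {
--         table_name: {
--             column_name: sorted(set(values))
--             for column_name, values in column_map.items()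
--         }
--         for table_name, column_map in serialized.items()
--     }
-- ===== SOURCE B (Python) =====
-- def serialize_distinct_cache(distinct_cache):
--     """Convert validated distinct values to a cache-safe nested payload.
--
--     Single-pass construction: each column's list is kept sorted and
--     duplicate-free at all times by inserting every value at its ordered
--     position (and skipping it when already present), so no second
--     sort/dedup phase over the grouped data is needed.
--     """
--     serialized = {}
--     for table_name, column_name, value in distinct_cache:
--         values = serialized.setdefault(table_name, {}).setdefault(column_name, [])
--         for i, existing in enumerate(values):
--             if existing == value:
--                 break
--             if value < existing:
--                 values.insert(i, value)
--                 break
--         else: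
--             values.append(value)
--     return serialized
-- ===== Notes on version B (the rewrite author's own statement) =====
-- stated objective: alternative
-- what changed: B builds the nested payload in a single pass that keeps every column's value list sorted and duplicate-free by ordered insertion, instead of A's two-phase group-into-lists then per-group sorted(set(...)) rewrite.
import Mathlib
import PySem

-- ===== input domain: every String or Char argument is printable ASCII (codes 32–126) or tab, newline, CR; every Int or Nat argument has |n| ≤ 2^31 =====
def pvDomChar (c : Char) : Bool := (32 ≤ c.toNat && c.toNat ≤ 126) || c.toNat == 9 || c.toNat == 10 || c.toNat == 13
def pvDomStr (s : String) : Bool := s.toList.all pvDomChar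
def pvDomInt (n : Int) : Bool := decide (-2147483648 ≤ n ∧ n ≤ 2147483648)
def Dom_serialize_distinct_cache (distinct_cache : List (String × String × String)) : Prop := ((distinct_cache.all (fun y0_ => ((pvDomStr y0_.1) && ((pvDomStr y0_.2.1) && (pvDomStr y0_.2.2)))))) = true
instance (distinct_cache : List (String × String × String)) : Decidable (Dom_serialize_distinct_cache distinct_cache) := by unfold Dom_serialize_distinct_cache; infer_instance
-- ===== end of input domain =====

-- B (same cost class): one pass that keeps each column's value list sorted and duplicate-free
-- by ordered insertion, instead of A's group-into-lists phase followed by sorted(set(...)).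

-- ===== PORT A =====
-- A's chained setdefault + append mutates the dict entry in place; this is ported exactly as
-- getD-then-insert (PySem.Dict.insert overwrites in place, new keys append = Python semantics).
def serialize_distinct_cache (distinct_cache : List (String × String × String)) : List (String × List (String × List String)) :=
  let serialized : PySem.Dict String (PySem.Dict String (List String)) :=
    distinct_cache.foldl (fun d p =>
      let inner := d.getD p.1 PySem.Dict.empty
      d.insert p.1 (inner.insert p.2.1 (inner.getD p.2.1 [] ++ [p.2.2]))) PySem.Dict.empty
  serialized.items.map (fun tp =>
    (tp.1, tp.2.items.map (fun cp =>
      (cp.1, PySem.List.sorted (PySem.Set.ofList cp.2) (fun x => x) false))))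

-- ===== PORT B =====
-- the inner for/else of Source B: walk the sorted list, stop on an equal element,
-- insert before the first larger one, else append at the end
def insSorted (vals : List String) (v : String) : List String :=
  match vals with
  | [] => [v]
  | x :: xs => if x == v then x :: xs
               else if v < x then v :: x :: xs
               else x :: insSorted xs v

def serialize_distinct_cache_alt (distinct_cache : List (String × String × String)) : List (String × List (String × List String)) :=
  let serialized : PySem.Dict String (PySem.Dict String (List String)) :=
    distinct_cache.foldl (fun d p =>
      let inner := d.getD p.1 PySem.Dict.empty
      d.insert p.1 (inner.insert p.2.1 (insSorted (inner.getD p.2.1 []) p.2.2))) PySem.Dict.empty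
  serialized.items.map (fun tp => (tp.1, tp.2.items))

-- ===== PRECONDITION & SPEC =====
def Spec_serialize_distinct_cache (distinct_cache : List (String × String × String)) (out : List (String × List (String × List String))) : Prop := out = serialize_distinct_cache_alt distinct_cache
instance (distinct_cache : List (String × String × String)) (out : List (String × List (String × List String))) : Decidable (Spec_serialize_distinct_cache distinct_cache out) := by unfold Spec_serialize_distinct_cache; infer_instance

-- ===== CLAIM (what is proved, stated in full; the proofs are below) =====
def Claim_equal_serialize_distinct_cache : Prop := ∀ (distinct_cache : List (String × String × String)), Dom_serialize_distinct_cache distinct_cache → Spec_serialize_distinct_cache distinct_cache (serialize_distinct_cache distinct_cache)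

-- ===== LEMMAS AND PROOFS =====

-- proof-only abbreviations for the two programs' loops
def pvStep (d : PySem.Dict String (PySem.Dict String (List String))) (p : String × String × String) : PySem.Dict String (PySem.Dict String (List String)) :=
  d.insert p.1 ((d.getD p.1 PySem.Dict.empty).insert p.2.1
    ((d.getD p.1 PySem.Dict.empty).getD p.2.1 [] ++ [p.2.2]))

def pvBuild (xs : List (String × String × String)) : PySem.Dict String (PySem.Dict String (List String)) :=
  xs.foldl pvStep PySem.Dict.empty

def pvStepB (d : PySem.Dict String (PySem.Dict String (List String))) (p : String × String × String) : PySem.Dict String (PySem.Dict String (List String)) :=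
  d.insert p.1 ((d.getD p.1 PySem.Dict.empty).insert p.2.1
    (insSorted ((d.getD p.1 PySem.Dict.empty).getD p.2.1 []) p.2.2))

def pvBuildB (xs : List (String × String × String)) : PySem.Dict String (PySem.Dict String (List String)) :=
  xs.foldl pvStepB PySem.Dict.empty

def pvTables (xs : List (String × String × String)) : List String :=
  xs.foldl (fun ts p => if ts.contains p.1 then ts else ts ++ [p.1]) []

def pvCols (t : String) (xs : List (String × String × String)) : List String :=
  xs.foldl (fun cs p => if p.1 == t && !cs.contains p.2.1 then cs ++ [p.2.1] else cs) []

def pvVals (t c : String) (xs : List (String × String × String)) : List String :=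
  xs.filterMap (fun p => if p.1 == t && p.2.1 == c then some p.2.2 else none)

theorem portA_eq (dc : List (String × String × String)) :
    serialize_distinct_cache dc = (pvBuild dc).items.map (fun tp =>
      (tp.1, tp.2.items.map (fun cp =>
        (cp.1, PySem.List.sorted (PySem.Set.ofList cp.2) (fun x => x) false)))) := rfl

theorem portB_eq (dc : List (String × String × String)) :
    serialize_distinct_cache_alt dc = (pvBuildB dc).items.map (fun tp => (tp.1, tp.2.items)) := rfl

theorem cols_general (t : String) (xs : List (String × String × String)) (acc : List String) :
    xs.foldl (fun cs p => if p.1 == t && !cs.contains p.2.1 then cs ++ [p.2.1] else cs) acc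
      = ((xs.filter (fun p => p.1 == t)).map (fun p => p.2.1)).foldl PySem.Set.add acc := by
  induction xs generalizing acc with
  | nil => rfl
  | cons p xs ih =>
      simp only [List.foldl_cons, List.filter_cons]
      by_cases h : (p.1 == t) = true
      · rw [if_pos h, List.map_cons, List.foldl_cons, ih]
        congr 1
        simp only [h, Bool.true_and, PySem.Set.add]
        by_cases hc : p.2.1 ∈ acc <;> simp [hc]
      · have h' : (p.1 == t) = false := by simpa using h
        simp only [h', Bool.false_and, Bool.false_eq_true, if_false]
        exact ih acc

theorem tables_eq_ofList (xs : List (String × String × String)) :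
    pvTables xs = PySem.Set.ofList (xs.map (fun p => p.1)) := by
  rw [PySem.Set.ofList_eq_foldl, List.foldl_map]
  rfl

theorem cols_eq_ofList (t : String) (xs : List (String × String × String)) :
    pvCols t xs = PySem.Set.ofList ((xs.filter (fun p => p.1 == t)).map (fun p => p.2.1)) := by
  rw [PySem.Set.ofList_eq_foldl]
  exact cols_general t xs []

theorem nodup_cols (t : String) (xs : List (String × String × String)) : (pvCols t xs).Nodup := by
  rw [cols_eq_ofList]; exact PySem.Set.nodup_ofList _

theorem mem_cols (c t : String) (xs : List (String × String × String)) :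
    c ∈ pvCols t xs ↔ ∃ p ∈ xs, p.1 = t ∧ p.2.1 = c := by
  rw [cols_eq_ofList, PySem.Set.mem_ofList]
  simp only [List.mem_map, List.mem_filter, beq_iff_eq]
  constructor
  · rintro ⟨p, ⟨hp, h1⟩, h2⟩; exact ⟨p, hp, h1, h2⟩
  · rintro ⟨p, hp, h1, h2⟩; exact ⟨p, ⟨hp, h1⟩, h2⟩

theorem vals_nil_of_not_mem_cols (c t : String) (xs : List (String × String × String))
    (h : c ∉ pvCols t xs) : pvVals t c xs = [] := by
  unfold pvVals
  rw [List.filterMap_eq_nil_iff]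
  intro p hp
  by_cases h1 : p.1 = t
  · by_cases h2 : p.2.1 = c
    · exact absurd ((mem_cols c t xs).2 ⟨p, hp, h1, h2⟩) h
    · simp [h2]
  · simp [h1]

theorem keys_build (xs : List (String × String × String)) :
    (pvBuild xs).keys = pvTables xs := by
  have h := PySem.Dict.keys_foldl_insert_key (l := xs)
    (key := fun p : String × String × String => p.1)
    (f := fun (d : PySem.Dict String (PySem.Dict String (List String))) p =>
      ((d.getD p.1 PySem.Dict.empty).insert p.2.1
        ((d.getD p.1 PySem.Dict.empty).getD p.2.1 [] ++ [p.2.2])))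
    (d := PySem.Dict.empty)
  have h2 : (pvBuild xs).keys
      = PySem.Set.update (PySem.Dict.keys (PySem.Dict.empty (κ := String)
          (ν := PySem.Dict String (List String)))) (xs.map (fun p => p.1)) := h
  rw [h2, tables_eq_ofList]
  rfl

theorem keys_buildB (xs : List (String × String × String)) :
    (pvBuildB xs).keys = pvTables xs := by
  have h := PySem.Dict.keys_foldl_insert_key (l := xs)
    (key := fun p : String × String × String => p.1)
    (f := fun (d : PySem.Dict String (PySem.Dict String (List String))) p =>
      ((d.getD p.1 PySem.Dict.empty).insert p.2.1
        (insSorted ((d.getD p.1 PySem.Dict.empty).getD p.2.1 []) p.2.2)))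
    (d := PySem.Dict.empty)
  have h2 : (pvBuildB xs).keys
      = PySem.Set.update (PySem.Dict.keys (PySem.Dict.empty (κ := String)
          (ν := PySem.Dict String (List String)))) (xs.map (fun p => p.1)) := h
  rw [h2, tables_eq_ofList]
  rfl

theorem nodup_keys_build (xs : List (String × String × String)) :
    (pvBuild xs).keys.Nodup := by
  have h := PySem.Dict.nodup_keys_foldl_insert_key (l := xs)
    (key := fun p : String × String × String => p.1)
    (f := fun (d : PySem.Dict String (PySem.Dict String (List String))) p =>
      ((d.getD p.1 PySem.Dict.empty).insert p.2.1
        ((d.getD p.1 PySem.Dict.empty).getD p.2.1 [] ++ [p.2.2])))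
    (d := PySem.Dict.empty) PySem.Dict.nodup_keys_empty
  exact h

theorem nodup_keys_buildB (xs : List (String × String × String)) :
    (pvBuildB xs).keys.Nodup := by
  have h := PySem.Dict.nodup_keys_foldl_insert_key (l := xs)
    (key := fun p : String × String × String => p.1)
    (f := fun (d : PySem.Dict String (PySem.Dict String (List String))) p =>
      ((d.getD p.1 PySem.Dict.empty).insert p.2.1
        (insSorted ((d.getD p.1 PySem.Dict.empty).getD p.2.1 []) p.2.2)))
    (d := PySem.Dict.empty) PySem.Dict.nodup_keys_empty
  exact h

theorem inner_keys (t : String) (xs : List (String × String × String))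
    (f : List String → List String)
    (ih : ((pvBuild xs).getD t PySem.Dict.empty).items
      = (pvCols t xs).map (fun c => (c, f (pvVals t c xs)))) :
    ((pvBuild xs).getD t PySem.Dict.empty).keys = pvCols t xs := by
  show (((pvBuild xs).getD t PySem.Dict.empty).items).map Prod.fst = pvCols t xs
  rw [ih, List.map_map]
  have hcomp : (Prod.fst ∘ fun c => ((c, f (pvVals t c xs)) : String × List String)) = id := rfl
  rw [hcomp, List.map_id]

theorem build_getD_items (t : String) (xs : List (String × String × String)) :
    ((pvBuild xs).getD t PySem.Dict.empty).items
      = (pvCols t xs).map (fun c => (c, pvVals t c xs)) := by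
  induction xs using List.reverseRecOn with
  | nil => rfl
  | append_singleton xs p ih =>
    have hb : pvBuild (xs ++ [p]) = pvStep (pvBuild xs) p := by
      unfold pvBuild; rw [List.foldl_append]; rfl
    have hv : ∀ c, pvVals t c (xs ++ [p])
        = pvVals t c xs ++ (if p.1 == t && p.2.1 == c then [p.2.2] else []) := by
      intro c
      unfold pvVals
      rw [List.filterMap_append]
      congr 1
      simp only [List.filterMap_cons, List.filterMap_nil]
      by_cases h : (p.1 == t && p.2.1 == c) = true <;> simp [h]
    have hcols : pvCols t (xs ++ [p])
        = if p.1 == t && !(pvCols t xs).contains p.2.1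
          then pvCols t xs ++ [p.2.1] else pvCols t xs := by
      unfold pvCols; rw [List.foldl_append]; rfl
    rw [hb]
    unfold pvStep
    by_cases ht : t = p.1
    · have hpt : (p.1 == t) = true := by simp [ht]
      rw [PySem.Dict.getD_insert, if_pos ht, ← ht]
      have hk := inner_keys t xs id (by simpa using ih)
      have hnd : ((pvBuild xs).getD t PySem.Dict.empty).keys.Nodup := by
        rw [hk]; exact nodup_cols t xs
      have hcont : ((pvBuild xs).getD t PySem.Dict.empty).contains p.2.1
          = decide (p.2.1 ∈ pvCols t xs) := by
        rw [PySem.Dict.contains_eq_decide_mem_keys, hk]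
      by_cases hmem : p.2.1 ∈ pvCols t xs
      · have hcontT : ((pvBuild xs).getD t PySem.Dict.empty).contains p.2.1 = true := by
          rw [hcont]; simp [hmem]
        have hmemItems : (p.2.1, pvVals t p.2.1 xs)
            ∈ ((pvBuild xs).getD t PySem.Dict.empty).items := by
          rw [ih]; exact List.mem_map_of_mem hmem
        have hold : ((pvBuild xs).getD t PySem.Dict.empty).getD p.2.1 []
            = pvVals t p.2.1 xs := PySem.Dict.getD_of_mem_items _ hmemItems hnd []
        rw [PySem.Dict.items_insert, hcontT, if_pos rfl]
        rw [hcols, ih, List.map_map]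
        rw [if_neg (by simp [hmem])]
        refine List.map_congr_left (fun c hc => ?_)
        by_cases hcc : c = p.2.1
        · subst hcc
          simp [hv, hold, hpt]
        · have : (p.2.1 == c) = false := by simpa using Ne.symm hcc
          simp [hv, hcc, this, hpt]
      · have hcontF : ((pvBuild xs).getD t PySem.Dict.empty).contains p.2.1 = false := by
          rw [hcont]; simp [hmem]
        have hold : ((pvBuild xs).getD t PySem.Dict.empty).getD p.2.1 [] = [] :=
          PySem.Dict.getD_of_not_contains _ _ hcontF
        rw [PySem.Dict.items_insert, hcontF]
        simp only [Bool.false_eq_true, if_false]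
        rw [hcols, if_pos (by simp [hpt, hmem]), ih, List.map_append]
        congr 1
        · refine List.map_congr_left (fun c hc => ?_)
          have hcc : (p.2.1 == c) = false := by
            simp only [beq_eq_false_iff_ne, ne_eq]
            intro he; exact hmem (he ▸ hc)
          simp [hv, hcc]
        · simp [hv, hold, hpt, vals_nil_of_not_mem_cols _ _ _ hmem]
    · have hpt : (p.1 == t) = false := by
        simp only [beq_eq_false_iff_ne, ne_eq]
        exact fun h => ht h.symm
      rw [PySem.Dict.getD_insert, if_neg ht]
      rw [hcols, if_neg (by simp [hpt])]
      rw [ih]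
      refine List.map_congr_left (fun c hc => ?_)
      simp [hv, hpt]

-- ===== B-side lemmas: ordered insertion builds sorted(set(vals)) =====

theorem mem_insSorted (l : List String) (v y : String) :
    y ∈ insSorted l v ↔ y = v ∨ y ∈ l := by
  induction l with
  | nil => simp [insSorted]
  | cons x xs ih =>
      unfold insSorted
      by_cases hx : (x == v) = true
      · have : x = v := by simpa using hx
        subst this
        simp
      · rw [if_neg hx]
        by_cases hlt : v < x
        · simp [hlt]
        · simp [hlt, ih]
          tauto

theorem pairwise_insSorted (l : List String) (v : String)
    (h : l.Pairwise (· < ·)) : (insSorted l v).Pairwise (· < ·) := by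
  induction l with
  | nil => simp [insSorted]
  | cons x xs ih =>
      unfold insSorted
      by_cases hx : (x == v) = true
      · simpa [hx] using h
      · rw [if_neg hx]
        have hne : x ≠ v := by simpa using hx
        rcases List.pairwise_cons.mp h with ⟨hxall, hxs⟩
        by_cases hlt : v < x
        · rw [if_pos hlt]
          refine List.pairwise_cons.mpr ⟨?_, h⟩
          intro y hy
          rcases List.mem_cons.mp hy with rfl | hy
          · exact hlt
          · exact lt_trans hlt (hxall y hy)
        · rw [if_neg hlt]
          have hxv : x < v := by
            rcases lt_trichotomy x v with h1 | h1 | h1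
            · exact h1
            · exact absurd h1 hne
            · exact absurd h1 hlt
          refine List.pairwise_cons.mpr ⟨?_, ih hxs⟩
          intro y hy
          rcases (mem_insSorted xs v y).mp hy with rfl | hy
          · exact hxv
          · exact hxall y hy

theorem foldl_insSorted_inv (vals : List String) (acc : List String)
    (h : acc.Pairwise (· < ·)) :
    (vals.foldl insSorted acc).Pairwise (· < ·)
      ∧ (∀ y, y ∈ vals.foldl insSorted acc ↔ y ∈ vals ∨ y ∈ acc) := by
  induction vals generalizing acc with
  | nil => exact ⟨h, fun y => by simp⟩
  | cons v vs ih =>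
      rcases ih (insSorted acc v) (pairwise_insSorted acc v h) with ⟨hp, hm⟩
      refine ⟨hp, fun y => ?_⟩
      rw [List.foldl_cons] at *
      rw [hm y, mem_insSorted]
      simp [List.mem_cons]
      tauto

theorem foldl_insSorted_eq_sorted_set (vals : List String) :
    vals.foldl insSorted [] = PySem.List.sorted (PySem.Set.ofList vals) (fun x => x) false := by
  rcases foldl_insSorted_inv vals [] List.Pairwise.nil with ⟨hp, hm⟩
  refine (PySem.List.sorted_eq_of_perm_of_pairwise_lt _ _ (fun x => x) ?_ hp).symm
  refine (List.perm_ext_iff_of_nodup (hp.imp ne_of_lt) (PySem.Set.nodup_ofList _)).mpr ?_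
  intro y
  rw [hm y, PySem.Set.mem_ofList]
  simp

theorem buildB_getD_items (t : String) (xs : List (String × String × String)) :
    ((pvBuildB xs).getD t PySem.Dict.empty).items
      = (pvCols t xs).map (fun c => (c, (pvVals t c xs).foldl insSorted [])) := by
  induction xs using List.reverseRecOn with
  | nil => rfl
  | append_singleton xs p ih =>
    have hb : pvBuildB (xs ++ [p]) = pvStepB (pvBuildB xs) p := by
      unfold pvBuildB; rw [List.foldl_append]; rfl
    have hv : ∀ c, pvVals t c (xs ++ [p])
        = pvVals t c xs ++ (if p.1 == t && p.2.1 == c then [p.2.2] else []) := by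
      intro c
      unfold pvVals
      rw [List.filterMap_append]
      congr 1
      simp only [List.filterMap_cons, List.filterMap_nil]
      by_cases h : (p.1 == t && p.2.1 == c) = true <;> simp [h]
    have hcols : pvCols t (xs ++ [p])
        = if p.1 == t && !(pvCols t xs).contains p.2.1
          then pvCols t xs ++ [p.2.1] else pvCols t xs := by
      unfold pvCols; rw [List.foldl_append]; rfl
    rw [hb]
    unfold pvStepB
    by_cases ht : t = p.1
    · have hpt : (p.1 == t) = true := by simp [ht]
      rw [PySem.Dict.getD_insert, if_pos ht, ← ht]
      have hk : ((pvBuildB xs).getD t PySem.Dict.empty).keys = pvCols t xs := by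
        show (((pvBuildB xs).getD t PySem.Dict.empty).items).map Prod.fst = pvCols t xs
        rw [ih, List.map_map]
        have hcomp : (Prod.fst ∘ fun c =>
            ((c, (pvVals t c xs).foldl insSorted []) : String × List String)) = id := rfl
        rw [hcomp, List.map_id]
      have hnd : ((pvBuildB xs).getD t PySem.Dict.empty).keys.Nodup := by
        rw [hk]; exact nodup_cols t xs
      have hcont : ((pvBuildB xs).getD t PySem.Dict.empty).contains p.2.1
          = decide (p.2.1 ∈ pvCols t xs) := by
        rw [PySem.Dict.contains_eq_decide_mem_keys, hk]
      by_cases hmem : p.2.1 ∈ pvCols t xs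
      · have hcontT : ((pvBuildB xs).getD t PySem.Dict.empty).contains p.2.1 = true := by
          rw [hcont]; simp [hmem]
        have hmemItems : (p.2.1, (pvVals t p.2.1 xs).foldl insSorted [])
            ∈ ((pvBuildB xs).getD t PySem.Dict.empty).items := by
          rw [ih]; exact List.mem_map_of_mem hmem
        have hold : ((pvBuildB xs).getD t PySem.Dict.empty).getD p.2.1 []
            = (pvVals t p.2.1 xs).foldl insSorted [] :=
          PySem.Dict.getD_of_mem_items _ hmemItems hnd []
        rw [PySem.Dict.items_insert, hcontT, if_pos rfl]
        rw [hcols, ih, List.map_map]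
        rw [if_neg (by simp [hmem])]
        refine List.map_congr_left (fun c hc => ?_)
        by_cases hcc : c = p.2.1
        · subst hcc
          simp only [Function.comp, hold]
          simp [hv, hpt, List.foldl_append]
        · have : (p.2.1 == c) = false := by simpa using Ne.symm hcc
          simp [hv, hcc, this, hpt]
      · have hcontF : ((pvBuildB xs).getD t PySem.Dict.empty).contains p.2.1 = false := by
          rw [hcont]; simp [hmem]
        have hold : ((pvBuildB xs).getD t PySem.Dict.empty).getD p.2.1 [] = [] :=
          PySem.Dict.getD_of_not_contains _ _ hcontF
        rw [PySem.Dict.items_insert, hcontF]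
        simp only [Bool.false_eq_true, if_false]
        rw [hcols, if_pos (by simp [hpt, hmem]), ih, List.map_append]
        congr 1
        · refine List.map_congr_left (fun c hc => ?_)
          have hcc : (p.2.1 == c) = false := by
            simp only [beq_eq_false_iff_ne, ne_eq]
            intro he; exact hmem (he ▸ hc)
          simp [hv, hcc]
        · simp [hv, hold, hpt, vals_nil_of_not_mem_cols _ _ _ hmem, List.foldl_append]
    · have hpt : (p.1 == t) = false := by
        simp only [beq_eq_false_iff_ne, ne_eq]
        exact fun h => ht h.symm
      rw [PySem.Dict.getD_insert, if_neg ht]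
      rw [hcols, if_neg (by simp [hpt])]
      rw [ih]
      refine List.map_congr_left (fun c hc => ?_)
      simp [hv, hpt]

-- ===== VERDICT (by name: the statement is the Claim_ definition above) =====
theorem serialize_distinct_cache_spec : Claim_equal_serialize_distinct_cache := by
  intro dc _
  show serialize_distinct_cache dc = serialize_distinct_cache_alt dc
  rw [portA_eq, portB_eq]
  rw [PySem.Dict.items_eq_map_keys _ (nodup_keys_build dc) PySem.Dict.empty, keys_build,
    PySem.Dict.items_eq_map_keys _ (nodup_keys_buildB dc) PySem.Dict.empty, keys_buildB,
    List.map_map, List.map_map]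
  refine List.map_congr_left (fun t _ => ?_)
  simp only [Function.comp, build_getD_items, buildB_getD_items, List.map_map]
  refine congrArg _ (List.map_congr_left (fun c _ => ?_))
  simp [foldl_insSorted_eq_sorted_set]
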